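-- pv_equiv track=rewrite | github.com/rashidlasker/artificial-intelligence | AI2/TicTacToe.py | stringBoard
-- ===== SOURCE A (Python) =====
-- def stringBoard(perm, limit):
--     newBoard = '---------'
--     for n in range (limit):
--         if n%2 == 0:
--             newBoard = insertX(newBoard, perm.index(n))
--         else:
--             newBoard = insertO(newBoard, perm.index(n))
--     return newBoard
--
-- def insertX(board, num):
--     retBoard = board[:num] + 'X' + board[num+1:]
--     return retBoard
--
-- def insertO(board, num):
--     retBoard = board[:num] + 'O' + board[num+1:]
--     return retBoard
-- ===== SOURCE B (Python) =====
-- def stringBoard(perm, limit):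
--     cells = ['-'] * 9
--     for pos, v in enumerate(perm[:9]):
--         if 0 <= v < limit:
--             cells[pos] = 'X' if v % 2 == 0 else 'O'
--     return ''.join(cells)
-- ===== Notes on version B (the rewrite author's own statement) =====
-- stated objective: simpler
-- what changed: B inverts the loop: one pass over the nine board positions reading perm[pos] directly and filling a 9-cell list, instead of A's loop over move numbers that rescans perm with perm.index(n) and rebuilds the string by slice concatenation; Pre_ restricts to proper move lists (each move in range(limit) appears exactly once and within the 9-cell board, limit <= 9), excluding inputs where perm.index raises ValueError and corners where A's first-occurrence pick on duplicates or its string growth past the board is accidental.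
-- outside the precondition, e.g. on stringBoard([0, 0, 1], 2): A returns 'X-O------', B returns 'XXO------'; on stringBoard([-1, -1, -1, -1, -1, -1, -1, -1, -1, 0], 1): A returns '---------X', B returns '---------'; on stringBoard([0, 1, 2, 3, 4, 5, 6, 7, 8, 9, 10], 11): A returns 'XOXOXOXOXOX', B returns 'XOXOXOXOX'
import Mathlib
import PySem

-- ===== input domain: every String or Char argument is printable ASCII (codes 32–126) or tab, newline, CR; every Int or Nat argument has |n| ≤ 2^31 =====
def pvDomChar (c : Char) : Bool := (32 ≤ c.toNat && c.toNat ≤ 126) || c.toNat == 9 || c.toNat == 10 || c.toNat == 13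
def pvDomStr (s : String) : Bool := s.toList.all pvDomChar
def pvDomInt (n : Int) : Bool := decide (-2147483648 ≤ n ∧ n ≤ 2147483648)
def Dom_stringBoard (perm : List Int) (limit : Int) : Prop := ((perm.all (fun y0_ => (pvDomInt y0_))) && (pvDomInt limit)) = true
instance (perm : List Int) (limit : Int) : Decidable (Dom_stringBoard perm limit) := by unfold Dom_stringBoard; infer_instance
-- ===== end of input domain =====

-- B inverts A's loop: one pass over the nine board positions reading perm[pos] instead of a loop
-- over move numbers that rescans perm with perm.index(n); objective: simpler.


-- ===== PORT A =====
-- Strings are ported on the List Char side (PySem.Chars convention); String.ofList at the return.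
def insertX (board : List Char) (num : Int) : List Char :=
  PySem.List.slice board none (some num) ++ ['X'] ++ PySem.List.slice board (some (num + 1)) none

def insertO (board : List Char) (num : Int) : List Char :=
  PySem.List.slice board none (some num) ++ ['O'] ++ PySem.List.slice board (some (num + 1)) none

def stringBoard (perm : List Int) (limit : Int) : String :=
  String.ofList ((PySem.List.pyRange 0 limit 1).foldl (fun newBoard n =>
    if PySem.Int.mod n 2 = 0 then
      match PySem.List.index? perm n with
      | some i => insertX newBoard (i : Int)
      | none => newBoard        -- perm.index(n) raises ValueError: excluded by Pre_
    else
      match PySem.List.index? perm n with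
      | some i => insertO newBoard (i : Int)
      | none => newBoard        -- ValueError: excluded by Pre_
    ) "---------".toList)

-- ===== PORT B =====
def stringBoard_alt (perm : List Int) (limit : Int) : String :=
  String.ofList ((PySem.List.enumerate (PySem.List.slice perm none (some 9))).foldl
    (fun cells pv =>
      if 0 ≤ pv.2 ∧ pv.2 < limit then
        PySem.List.pySetD cells pv.1 (if PySem.Int.mod pv.2 2 = 0 then 'X' else 'O')
      else cells)
    (List.replicate 9 '-'))

-- ===== PRECONDITION & SPEC =====
-- Pre_ restricts to proper 9-cell move lists: limit ≤ 9 and every move n in range(limit) occurs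
-- exactly once in perm, at a position on the board (< 9).  It therefore excludes (a) inputs where
-- perm.index(n) raises ValueError (a missing move), (b) duplicate-move inputs, on which A's
-- perm.index first-occurrence pick is accidental, and (c) inputs placing a move past the 9-cell
-- board, on which A's slice concatenation accidentally grows the string beyond the board
-- (see claim cites for examples of (b) and (c)).
def Pre_stringBoard (perm : List Int) (limit : Int) : Prop :=
  limit ≤ 9 ∧ ∀ n ∈ PySem.List.pyRange 0 limit 1,
    PySem.List.count perm n = 1 ∧
    ((PySem.List.index? perm n).any (fun k => decide (k < 9))) = true
instance (perm : List Int) (limit : Int) : Decidable (Pre_stringBoard perm limit) := by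
  unfold Pre_stringBoard; infer_instance

def pvWitness_stringBoard : List Int × Int := ([1, 0, 2], 3)

def Spec_stringBoard (perm : List Int) (limit : Int) (out : String) : Prop := out = stringBoard_alt perm limit
instance (perm : List Int) (limit : Int) (out : String) : Decidable (Spec_stringBoard perm limit out) := by unfold Spec_stringBoard; infer_instance

-- ===== CLAIM (what is proved, stated in full; the proofs are below) =====
def Claim_equal_stringBoard : Prop := ∀ (perm : List Int) (limit : Int), Dom_stringBoard perm limit → Pre_stringBoard perm limit → Spec_stringBoard perm limit (stringBoard perm limit)

-- ===== LEMMAS AND PROOFS =====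

-- the mark move v leaves on the board
def markc (v : Int) : Char := if PySem.Int.mod v 2 = 0 then 'X' else 'O'

-- the character A's finished board carries at position p (moves up to m)
def cellc (perm : List Int) (m : Int) (p : Nat) : Char :=
  match perm[p]? with
  | some v => if 0 ≤ v ∧ v < m ∧ PySem.List.index? perm v = some p then markc v else '-'
  | none => '-'

-- the character B's finished board carries at position p
def altcell (perm : List Int) (limit : Int) (p : Nat) : Char :=
  match perm[p]? with
  | some v => if 0 ≤ v ∧ v < limit then markc v else '-'
  | none => '-'

lemma altcell_eq_some (perm : List Int) (limit : Int) (p : Nat) (v : Int)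
    (h : perm[p]? = some v) :
    altcell perm limit p = if 0 ≤ v ∧ v < limit then markc v else '-' := by
  unfold altcell; rw [h]

lemma altcell_eq_none (perm : List Int) (limit : Int) (p : Nat) (h : perm[p]? = none) :
    altcell perm limit p = '-' := by
  unfold altcell; rw [h]

def specBoard (perm : List Int) (m : Int) : List Char :=
  (List.range 9).map (cellc perm m)

lemma length_specBoard (perm : List Int) (m : Int) : (specBoard perm m).length = 9 := by
  simp [specBoard]

lemma cellc_eq_some (perm : List Int) (m : Int) (p : Nat) (v : Int)
    (h : perm[p]? = some v) :
    cellc perm m p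
      = if 0 ≤ v ∧ v < m ∧ PySem.List.index? perm v = some p then markc v else '-' := by
  unfold cellc; rw [h]

lemma cellc_eq_none (perm : List Int) (m : Int) (p : Nat) (h : perm[p]? = none) :
    cellc perm m p = '-' := by
  unfold cellc; rw [h]

lemma cellc_nonpos (perm : List Int) (m : Int) (hm : m ≤ 0) (p : Nat) :
    cellc perm m p = '-' := by
  cases h : perm[p]? with
  | none => exact cellc_eq_none perm m p h
  | some v => rw [cellc_eq_some perm m p v h]; exact if_neg (fun hc => by omega)

lemma specBoard_nonpos (perm : List Int) (m : Int) (hm : m ≤ 0) :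
    specBoard perm m = List.replicate 9 '-' := by
  refine List.eq_replicate_iff.mpr ⟨by simp [specBoard], ?_⟩
  intro c hc
  simp only [specBoard, List.mem_map] at hc
  obtain ⟨p, -, rfl⟩ := hc
  exact cellc_nonpos perm m hm p

lemma insert_slice_eq_set (b : List Char) (c : Char) (i : Nat) (h : i < b.length) :
    PySem.List.slice b none (some (i : Int)) ++ [c] ++
      PySem.List.slice b (some ((i : Int) + 1)) none = b.set i c := by
  have h1 : ((i : Int) + 1) = ((i + 1 : Nat) : Int) := by push_cast; ring
  rw [h1, PySem.List.slice_to_natCast, PySem.List.slice_from_natCast,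
    List.set_eq_take_cons_drop c h]
  simp

lemma specBoard_step (perm : List Int) (m : Int) (i : Nat) (hm : 0 ≤ m)
    (hi : PySem.List.index? perm m = some i) :
    (specBoard perm m).set i (markc m) = specBoard perm (m + 1) := by
  obtain ⟨hilen, hpm, -⟩ := PySem.List.getElem_of_index?_eq_some hi
  apply List.ext_getElem (by simp [specBoard])
  intro p hp1 hp2
  have hp9 : p < 9 := by simpa [specBoard] using hp2
  rw [List.getElem_set]
  simp only [specBoard, List.getElem_map, List.getElem_range]
  by_cases hip : i = p
  · subst hip
    rw [if_pos rfl]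
    rw [cellc_eq_some perm (m + 1) i m (by rw [List.getElem?_eq_getElem hilen, hpm])]
    rw [if_pos ⟨hm, by omega, hpm ▸ hi⟩]
  · rw [if_neg hip]
    cases hpv : perm[p]? with
    | none => rw [cellc_eq_none perm m p hpv, cellc_eq_none perm (m+1) p hpv]
    | some v =>
      rw [cellc_eq_some perm m p v hpv, cellc_eq_some perm (m+1) p v hpv]
      by_cases hc : 0 ≤ v ∧ v < m ∧ PySem.List.index? perm v = some p
      · rw [if_pos hc, if_pos ⟨hc.1, by omega, hc.2.2⟩]
      · rw [if_neg hc, if_neg ?_]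
        rintro ⟨h0, hv1, hidx⟩
        have hvm : v = m := by
          by_contra hne
          exact hc ⟨h0, by omega, hidx⟩
        subst hvm
        rw [hi] at hidx
        exact hip (Option.some.inj hidx)

-- A's loop computes specBoard
lemma foldA_eq_specBoard (perm : List Int) (limit : Int) (h : Pre_stringBoard perm limit) :
    ∀ m : Int, 0 ≤ m → m ≤ limit →
      (PySem.List.pyRange 0 m 1).foldl (fun newBoard n =>
        if PySem.Int.mod n 2 = 0 then
          match PySem.List.index? perm n with
          | some i => insertX newBoard (i : Int)
          | none => newBoard
        else
          match PySem.List.index? perm n with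
          | some i => insertO newBoard (i : Int)
          | none => newBoard) "---------".toList = specBoard perm m := by
  intro m hm
  induction m, hm using Int.le_induction with
  | base =>
    intro _
    rw [PySem.List.pyRange_one_eq_nil le_rfl, List.foldl_nil,
      specBoard_nonpos perm 0 le_rfl]
    decide
  | succ m hm0 ih =>
    intro hle
    rw [PySem.List.pyRange_one_succ_right hm0, List.foldl_append, ih (by omega),
      List.foldl_cons, List.foldl_nil]
    have hmem := (h.2 m (PySem.List.mem_pyRange_one.mpr ⟨hm0, by omega⟩)).2
    cases hidx : PySem.List.index? perm m with
    | none => rw [hidx] at hmem; simp [Option.any] at hmem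
    | some i =>
      rw [hidx] at hmem
      have hi9 : i < 9 := by simpa [Option.any] using hmem
      have hlen : i < (specBoard perm m).length := by rw [length_specBoard]; omega
      by_cases hm2 : PySem.Int.mod m 2 = 0
      · rw [if_pos hm2]
        show insertX (specBoard perm m) (i : Int) = _
        unfold insertX
        rw [insert_slice_eq_set _ _ _ hlen]
        have : markc m = 'X' := by unfold markc; rw [if_pos hm2]
        rw [← this, specBoard_step perm m i hm0 hidx]
      · rw [if_neg hm2]
        show insertO (specBoard perm m) (i : Int) = _
        unfold insertO
        rw [insert_slice_eq_set _ _ _ hlen]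
        have : markc m = 'O' := by unfold markc; rw [if_neg hm2]
        rw [← this, specBoard_step perm m i hm0 hidx]

-- B's loop preserves the board length
lemma foldB_length (limit : Int) (l : List (Int × Int)) (cells : List Char) :
    (l.foldl (fun cells pv =>
      if 0 ≤ pv.2 ∧ pv.2 < limit then
        PySem.List.pySetD cells pv.1 (if PySem.Int.mod pv.2 2 = 0 then 'X' else 'O')
      else cells) cells).length = cells.length := by
  induction l generalizing cells with
  | nil => rfl
  | cons x xs ih =>
    simp only [List.foldl_cons]
    split
    · rw [ih]; exact PySem.List.length_pySetD ..
    · exact ih cells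

-- B's loop computes altcell pointwise (from any start position s)
lemma foldB_getElem (perm : List Int) (limit : Int) :
    ∀ (xs : List Int) (s : Nat) (cells : List Char), cells.length = 9 →
      xs = (perm.drop s).take (9 - s) →
      (∀ p, s ≤ p → p < 9 → cells[p]? = some '-') →
      ∀ p, p < 9 →
        ((PySem.List.enumerate xs (s : Int)).foldl (fun cells pv =>
          if 0 ≤ pv.2 ∧ pv.2 < limit then
            PySem.List.pySetD cells pv.1 (if PySem.Int.mod pv.2 2 = 0 then 'X' else 'O')
          else cells) cells)[p]? =
        if p < s then cells[p]? else some (altcell perm limit p) := by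
  intro xs
  induction xs with
  | nil =>
    intro s cells h9 hxs hdash p hp
    rw [PySem.List.enumerate_nil, List.foldl_nil]
    by_cases hps : p < s
    · rw [if_pos hps]
    · rw [if_neg hps]
      have hplen : perm.length ≤ p := by
        have h0 : (perm.drop s).take (9 - s) = [] := hxs.symm
        rw [List.take_eq_nil_iff] at h0
        rcases h0 with h' | h'
        · omega
        · have := List.drop_eq_nil_iff.mp h'
          omega
      rw [hdash p (by omega) hp,
        altcell_eq_none perm limit p (List.getElem?_eq_none (by omega))]
  | cons v rest ih =>
    intro s cells h9 hxs hdash p hp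
    have hs9 : s < 9 := by
      by_contra hs
      rw [show 9 - s = 0 by omega] at hxs
      simp at hxs
    have hslen : s < perm.length := by
      by_contra hs
      rw [List.drop_eq_nil_iff.mpr (by omega)] at hxs
      simp at hxs
    have hdrop : perm.drop s = perm[s] :: perm.drop (s + 1) :=
      List.drop_eq_getElem_cons hslen
    have hxs' : v :: rest = perm[s] :: (perm.drop (s + 1)).take (9 - (s + 1)) := by
      rw [hxs, hdrop, show 9 - s = (9 - (s+1)) + 1 by omega, List.take_succ_cons]
    have hv : v = perm[s] := (List.cons.inj hxs').1
    have hrest : rest = (perm.drop (s + 1)).take (9 - (s + 1)) := (List.cons.inj hxs').2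
    have hps? : perm[s]? = some v := by rw [List.getElem?_eq_getElem hslen, hv]
    rw [PySem.List.enumerate_cons, List.foldl_cons]
    set ch : Char := (if PySem.Int.mod v 2 = 0 then 'X' else 'O') with hch
    set cond : Prop := (0 ≤ v ∧ v < limit) with hcond
    have hsets : (if cond then PySem.List.pySetD cells (s : Int) ch else cells)
        = if cond then cells.set s ch else cells := by
      split <;> simp [PySem.List.pySetD_natCast]
    have hcast : (s : Int) + 1 = ((s + 1 : Nat) : Int) := by push_cast; ring
    rw [hsets, hcast]
    set cells' : List Char := if cond then cells.set s ch else cells with hcells'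
    have h9' : cells'.length = 9 := by rw [hcells']; split <;> simp [h9]
    have hdash' : ∀ q, s + 1 ≤ q → q < 9 → cells'[q]? = some '-' := by
      intro q hq1 hq2
      have : cells'[q]? = cells[q]? := by
        rw [hcells']; split
        · exact List.getElem?_set_ne (by omega)
        · rfl
      rw [this]
      exact hdash q (by omega) hq2
    have hres := ih (s + 1) cells' h9' hrest hdash' p hp
    rw [hres]
    by_cases hps : p < s
    · rw [if_pos (by omega : p < s + 1), if_pos hps, hcells']
      split
      · exact List.getElem?_set_ne (by omega)
      · rfl
    · by_cases hpes : p = s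
      · subst hpes
        rw [if_pos (by omega : p < p + 1), if_neg (by omega : ¬ p < p)]
        rw [altcell_eq_some perm limit p v hps?, hcells']
        by_cases hc : cond
        · rw [if_pos hc, List.getElem?_set_self (by omega), if_pos hc]
          rw [hch]; rfl
        · rw [if_neg hc, hdash p (by omega) hp, if_neg hc]
      · rw [if_neg (by omega : ¬ p < s + 1), if_neg hps]

-- B's board is altcell over the nine positions
lemma foldB_eq_altBoard (perm : List Int) (limit : Int) :
    (PySem.List.enumerate (PySem.List.slice perm none (some 9))).foldl (fun cells pv =>
      if 0 ≤ pv.2 ∧ pv.2 < limit then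
        PySem.List.pySetD cells pv.1 (if PySem.Int.mod pv.2 2 = 0 then 'X' else 'O')
      else cells) (List.replicate 9 '-') = (List.range 9).map (altcell perm limit) := by
  have hslice : PySem.List.slice perm none (some (9 : Int)) = perm.take 9 := by
    simp [pysem]
  apply List.ext_getElem?
  intro p
  by_cases hp : p < 9
  · have h := foldB_getElem perm limit (perm.take 9) 0 (List.replicate 9 '-')
      (by simp) (by simp) (by intro q _ hq; rw [List.getElem?_replicate, if_pos hq]) p hp
    rw [hslice]
    rw [show ((0 : Nat) : Int) = (0 : Int) by rfl] at h
    rw [h, if_neg (by omega)]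
    simp [hp]
  · rw [List.getElem?_eq_none (by rw [foldB_length]; simp; omega),
      List.getElem?_eq_none (by simp; omega)]

-- a value occurring exactly once has its sole position as its index
lemma index?_of_count_one (perm : List Int) (v : Int) (p : Nat)
    (hc : PySem.List.count perm v = 1) (hp : perm[p]? = some v) :
    PySem.List.index? perm v = some p := by
  have hplen : p < perm.length := by
    by_contra h
    rw [List.getElem?_eq_none (by omega)] at hp
    simp at hp
  have hpv : perm[p] = v := by
    rw [List.getElem?_eq_getElem hplen] at hp
    exact Option.some.inj hp
  have hmem : v ∈ perm := hpv ▸ perm.getElem_mem hplen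
  obtain ⟨k, hk⟩ := Option.isSome_iff_exists.mp ((PySem.List.index?_isSome_iff perm v).mpr hmem)
  obtain ⟨hklen, hkv, hfirst⟩ := PySem.List.getElem_of_index?_eq_some hk
  have hkp : k = p := by
    by_contra hne
    have hkltp : k < p := by
      rcases Nat.lt_or_ge p k with hlt | hge
      · exact absurd hpv (hfirst p hlt)
      · omega
    have h1 : v ∈ perm.take (k + 1) := by
      have ht : (perm.take (k + 1))[k]'(by simp; omega) = perm[k] := List.getElem_take
      rw [← hkv, ← ht]
      exact List.getElem_mem _
    have h2 : v ∈ perm.drop (k + 1) := by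
      have hd : (perm.drop (k + 1))[p - (k + 1)]'(by simp; omega)
          = perm[(k + 1) + (p - (k + 1))]'(by omega) := List.getElem_drop
      have hidx : (k + 1) + (p - (k + 1)) = p := by omega
      have hd2 : (perm.drop (k + 1))[p - (k + 1)]'(by simp; omega) = v := by
        rw [hd]; simp only [hidx]; exact hpv
      rw [← hd2]
      exact List.getElem_mem _
    have hsplit : List.count v (perm.take (k + 1)) + List.count v (perm.drop (k + 1))
        = List.count v perm := by
      rw [← List.count_append, List.take_append_drop]
    have hc' : List.count v perm = 1 := by rw [← PySem.List.count_eq]; exact hc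
    have c1 : 0 < List.count v (perm.take (k + 1)) := List.count_pos_iff.mpr h1
    have c2 : 0 < List.count v (perm.drop (k + 1)) := List.count_pos_iff.mpr h2
    omega
  rw [hk, hkp]

-- under Pre_, A's per-cell characterization coincides with B's
lemma cellc_eq_altcell (perm : List Int) (limit : Int) (h : Pre_stringBoard perm limit)
    (p : Nat) : cellc perm limit p = altcell perm limit p := by
  cases hpv : perm[p]? with
  | none => rw [cellc_eq_none perm limit p hpv, altcell_eq_none perm limit p hpv]
  | some v =>
    rw [cellc_eq_some perm limit p v hpv, altcell_eq_some perm limit p v hpv]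
    by_cases hc : 0 ≤ v ∧ v < limit
    · have hcnt := (h.2 v (PySem.List.mem_pyRange_one.mpr ⟨hc.1, hc.2⟩)).1
      rw [if_pos ⟨hc.1, hc.2, index?_of_count_one perm v p hcnt hpv⟩, if_pos hc]
    · rw [if_neg (fun hh => hc ⟨hh.1, hh.2.1⟩), if_neg hc]

-- ===== VERDICT (by name: the statement is the Claim_ definition above) =====
theorem stringBoard_spec : Claim_equal_stringBoard := by
  intro perm limit _ hpre
  unfold Spec_stringBoard stringBoard stringBoard_alt
  rw [foldB_eq_altBoard]
  have halt : (List.range 9).map (altcell perm limit) = specBoard perm limit := by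
    unfold specBoard
    exact List.map_congr_left (fun p _ => (cellc_eq_altcell perm limit hpre p).symm)
  rw [halt]
  by_cases hl : 0 ≤ limit
  · rw [foldA_eq_specBoard perm limit hpre limit hl le_rfl]
  · rw [PySem.List.pyRange_one_eq_nil (by omega), List.foldl_nil,
      specBoard_nonpos perm limit (by omega)]
    decide
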